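-- pv_equiv track=rewrite | github.com/fp-computer-programming/hw-8-2-p22jdiao | hw8-2-5.py | weird_sum
-- ===== SOURCE A (Python) =====
-- def weird_sum(li):
--     li2 = []
--     for x in li:
--         if x % 2 != 0:
--             li2.append(x)
--
--     if li2 != []:
--         li.remove(li2[0])
--     total = 0
--     for y in li:
--         total += y
--
--     return total
-- ===== SOURCE B (Python) =====
-- def weird_sum(li):
--     total = sum(li)
--     for x in li:
--         if x % 2 != 0:
--             li.remove(x)
--             return total - x
--     return total
-- ===== Notes on version B (the rewrite author's own statement) =====
-- stated objective: simpler
-- what changed: B sums the whole list once and subtracts the first odd element found in a single scan (removing it in place like A), instead of A's building a list of all odds, removing its head, and re-summing the remainder.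
import Mathlib
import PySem

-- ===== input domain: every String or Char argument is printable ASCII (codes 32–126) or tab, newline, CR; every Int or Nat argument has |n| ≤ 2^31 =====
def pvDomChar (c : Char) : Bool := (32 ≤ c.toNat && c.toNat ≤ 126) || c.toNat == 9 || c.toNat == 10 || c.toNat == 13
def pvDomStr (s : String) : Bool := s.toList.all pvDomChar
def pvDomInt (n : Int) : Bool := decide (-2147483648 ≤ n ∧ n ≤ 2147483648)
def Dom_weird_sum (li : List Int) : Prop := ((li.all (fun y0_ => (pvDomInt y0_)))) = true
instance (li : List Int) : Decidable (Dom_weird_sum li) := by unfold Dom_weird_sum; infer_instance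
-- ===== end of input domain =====

-- B sums the list once and subtracts the first odd element (found in one scan), instead of
-- A's collect-all-odds / remove-first / re-sum; simpler, same cost. Both A and B mutate the
-- caller's list identically (remove the first odd element); the equivalence proved here is
-- about the return value.

-- ===== PORT A =====
def weird_sum (li : List Int) : Int :=
  -- li2 = []; for x in li: if x % 2 != 0: li2.append(x)
  let li2 := li.foldl (fun acc x => if PySem.Int.mod x 2 != 0 then acc ++ [x] else acc) []
  -- if li2 != []: li.remove(li2[0])   (li2[0] is always in li, so remove never raises)
  let li' := match li2 with
    | [] => li
    | x :: _ => (PySem.List.remove? li x).getD li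
  -- total = 0; for y in li: total += y
  li'.foldl (fun total y => total + y) 0

-- ===== PORT B =====
def weird_sum_alt (li : List Int) : Int :=
  let total := li.foldl (fun total y => total + y) 0
  match li.find? (fun x => PySem.Int.mod x 2 != 0) with
  | none => total
  | some x => total - x

-- ===== PRECONDITION & SPEC =====
def Spec_weird_sum (li : List Int) (out : Int) : Prop := out = weird_sum_alt li
instance (li : List Int) (out : Int) : Decidable (Spec_weird_sum li out) := by unfold Spec_weird_sum; infer_instance

-- ===== CLAIM (what is proved, stated in full; the proofs are below) =====
def Claim_equal_weird_sum : Prop := ∀ (li : List Int), Dom_weird_sum li → Spec_weird_sum li (weird_sum li)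

-- ===== LEMMAS AND PROOFS =====

theorem pv_foldl_filter (p : Int → Bool) (li : List Int) (acc : List Int) :
    li.foldl (fun acc x => if p x then acc ++ [x] else acc) acc = acc ++ li.filter p := by
  induction li generalizing acc with
  | nil => simp
  | cons a t ih =>
    by_cases h : p a <;> simp [List.foldl, h, ih]

theorem pv_foldl_sum (li : List Int) (a : Int) :
    li.foldl (fun total y => total + y) a = a + li.sum := by
  induction li generalizing a with
  | nil => simp
  | cons x t ih => simp [List.foldl, ih]; ring

theorem pv_head?_filter (p : Int → Bool) (li : List Int) :
    (li.filter p).head? = li.find? p := by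
  induction li with
  | nil => rfl
  | cons a t ih => by_cases h : p a <;> simp [h, ih]

theorem pv_sum_erase (li : List Int) (x : Int) (h : x ∈ li) :
    (li.erase x).sum = li.sum - x := by
  induction li with
  | nil => cases h
  | cons a t ih =>
    by_cases hax : a = x
    · subst hax; simp [List.erase_cons_head]
    · have hx : x ∈ t := by
        cases List.mem_cons.mp h with
        | inl h' => exact absurd h'.symm hax
        | inr h' => exact h'
      have : (a = x) = False := by simp [hax]
      simp [hax, ih hx]
      ring

-- ===== VERDICT (by name: the statement is the Claim_ definition above) =====
theorem weird_sum_spec : Claim_equal_weird_sum := by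
  intro li _
  unfold Spec_weird_sum weird_sum weird_sum_alt
  simp only [pv_foldl_filter, List.nil_append, pv_foldl_sum, Int.zero_add]
  set p : Int → Bool := fun x => PySem.Int.mod x 2 != 0 with hp
  rcases hf : li.filter p with _ | ⟨x, rest⟩
  · have : li.find? p = none := by rw [← pv_head?_filter, hf]; rfl
    simp [this]
  · have hfind : li.find? p = some x := by rw [← pv_head?_filter, hf]; rfl
    have hmem : x ∈ li := by
      have : x ∈ li.filter p := by rw [hf]; exact List.mem_cons_self
      exact (List.mem_filter.mp this).1
    have hrem := PySem.List.remove?_eq_some_erase li x hmem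
    simp only [hfind, hrem, Option.getD_some, pv_sum_erase li x hmem]
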